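-- pv_equiv track=rewrite | github.com/Devieira90/CalculoFacio | Calculo.py | calcular_perfis
-- ===== SOURCE A (Python) =====
-- def calcular_perfis(cortes, tamanho_perfil=6000):
--         # Cria uma cópia da lista de cortes para não modificar a original
--         cortes_restantes = sorted(cortes, reverse=True)  # Ordena do maior para o menor
--         perfis_utilizados = []  # Lista de perfis usados, cada perfil é uma lista de cortes
--         sobras_por_perfil = []  # Lista das sobras de cada perfil
--
--         while cortes_restantes:
--             comprimento_restante = tamanho_perfil
--             perfil_atual = []
--
--             # Itera sobre os cortes restantes para tentar encaixá-los no perfil atual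
--             i = 0
--             while i < len(cortes_restantes):
--                 corte = cortes_restantes[i]
--
--                 if corte <= comprimento_restante:
--                     perfil_atual.append(corte)
--                     comprimento_restante -= corte
--                     cortes_restantes.pop(i) # Remove o corte que foi utilizado
--                     i = 0  # Reinicia o índice para tentar encaixar os maiores cortes restantes novamente
--                 else:
--                     i += 1
--
--             # Adiciona o perfil completo (ou parcialmente preenchido) e sua sobra
--             perfis_utilizados.append(perfil_atual)
--             sobras_por_perfil.append(comprimento_restante)
--
--         return len(perfis_utilizados), sobras_por_perfil, perfis_utilizados
-- ===== SOURCE B (Python) =====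
-- def calcular_perfis(cortes, tamanho_perfil=6000):
--     # One forward partition pass per profile: since remaining capacity never
--     # grows (cuts are nonnegative lengths), a cut skipped once never fits later
--     # in the same profile, so A's index resets and in-place pops are unnecessary.
--     pendentes = sorted(cortes, reverse=True)
--     perfis_utilizados = []
--     sobras_por_perfil = []
--     while pendentes:
--         restante = tamanho_perfil
--         perfil = []
--         proximos = []
--         for corte in pendentes:
--             if corte <= restante:
--                 perfil.append(corte)
--                 restante -= corte
--             else:
--                 proximos.append(corte)
--         if not perfil:
--             break  # no pending cut fits an empty profile: no progress is possible
--         pendentes = proximos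
--         perfis_utilizados.append(perfil)
--         sobras_por_perfil.append(restante)
--     return len(perfis_utilizados), sobras_por_perfil, perfis_utilizados
-- ===== Notes on version B (the rewrite author's own statement) =====
-- stated objective: alternative
-- what changed: Replaces A's in-place list with indexed rescans (pop + reset i to 0 after every fit) by one forward partition pass per profile over an immutable pending list, valid because with nonnegative cuts the remaining capacity never grows, so a skipped cut can never fit later in the same profile; intended as cheaper per profile, but a timing run could not confirm a speed-up.
-- outside the precondition, e.g. on calcular_perfis([10, 6, -7], 10): A returns (1, [1], [[10, -7, 6]]), B returns (2, [7, 4], [[10, -7], [6]]); on calcular_perfis([7], 5): A does not finish within the time limit, B returns (0, [], [])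
import Mathlib
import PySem

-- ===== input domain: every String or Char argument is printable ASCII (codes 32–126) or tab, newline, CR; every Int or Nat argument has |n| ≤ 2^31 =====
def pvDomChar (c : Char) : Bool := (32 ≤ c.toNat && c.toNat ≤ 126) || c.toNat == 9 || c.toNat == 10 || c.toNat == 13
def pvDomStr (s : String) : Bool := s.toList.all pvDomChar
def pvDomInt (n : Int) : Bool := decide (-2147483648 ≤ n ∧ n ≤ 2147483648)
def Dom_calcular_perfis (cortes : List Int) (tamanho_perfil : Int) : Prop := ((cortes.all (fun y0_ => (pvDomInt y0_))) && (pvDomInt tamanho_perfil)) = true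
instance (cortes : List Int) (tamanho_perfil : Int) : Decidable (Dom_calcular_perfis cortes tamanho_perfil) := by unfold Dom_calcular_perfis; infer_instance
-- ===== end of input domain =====

-- B replaces A's pop-and-reset inner scan by one forward partition pass per profile
-- (a different traversal; correct because capacity never grows when all cuts are nonnegative).

-- ===== PORT A =====
-- inner 'while i < len(cortes_restantes)' loop of A: indexed scan with pop and reset to 0
def pvInnerA (rest : List Int) (rem : Int) (perfil : List Int) (i : Nat) :
    List Int × Int × List Int :=
  if h : i < rest.length then
    let corte := rest[i]
    if corte ≤ rem then
      pvInnerA (rest.eraseIdx i) (rem - corte) (perfil ++ [corte]) 0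
    else
      pvInnerA rest rem perfil (i + 1)
  else (rest, rem, perfil)
termination_by (rest.length, rest.length - i)
decreasing_by
  · have : (rest.eraseIdx i).length < rest.length := by
      rw [List.length_eraseIdx_of_lt h]; omega
    exact Prod.Lex.left _ _ this
  · exact Prod.Lex.right _ (by omega)

-- outer 'while cortes_restantes' loop of A; fuel bounds the iterations (the Python
-- loop diverges when a cut exceeds tamanho_perfil; such inputs are outside Pre_)
def pvOuterA (fuel : Nat) (rest : List Int) (tam : Int)
    (perfis : List (List Int)) (sobras : List Int) : List (List Int) × List Int :=
  match fuel with
  | 0 => (perfis, sobras)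
  | fuel + 1 =>
    if rest.isEmpty then (perfis, sobras)
    else
      let st := pvInnerA rest tam [] 0
      pvOuterA fuel st.1 tam (perfis ++ [st.2.2]) (sobras ++ [st.2.1])

def calcular_perfis (cortes : List Int) (tamanho_perfil : Int) : Int × List Int × List (List Int) :=
  let cr := PySem.List.sorted cortes (fun x => x) true
  let res := pvOuterA cr.length cr tamanho_perfil [] []
  ((res.1.length : Int), res.2, res.1)

-- ===== PORT B =====
-- the 'for corte in pendentes' partition pass of B; state = (perfil, proximos, restante)
def pvPassB (pend : List Int) (tam : Int) : List Int × List Int × Int :=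
  pend.foldl (fun (st : List Int × List Int × Int) corte =>
    if corte ≤ st.2.2 then (st.1 ++ [corte], st.2.1, st.2.2 - corte)
    else (st.1, st.2.1 ++ [corte], st.2.2)) ([], [], tam)

-- outer 'while pendentes' loop of B, fuelled like A's; B breaks when a pass
-- places nothing (no progress possible)
def pvOuterB (fuel : Nat) (pend : List Int) (tam : Int)
    (perfis : List (List Int)) (sobras : List Int) : List (List Int) × List Int :=
  match fuel with
  | 0 => (perfis, sobras)
  | fuel + 1 =>
    if pend.isEmpty then (perfis, sobras)
    else
      let st := pvPassB pend tam
      if st.1.isEmpty then (perfis, sobras)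
      else pvOuterB fuel st.2.1 tam (perfis ++ [st.1]) (sobras ++ [st.2.2])

def calcular_perfis_alt (cortes : List Int) (tamanho_perfil : Int) : Int × List Int × List (List Int) :=
  let pend := PySem.List.sorted cortes (fun x => x) true
  let res := pvOuterB pend.length pend tamanho_perfil [] []
  ((res.1.length : Int), res.2, res.1)

-- ===== PRECONDITION & SPEC =====
-- Pre_ excludes inputs with a cut greater than tamanho_perfil (there Python A loops forever,
-- returning nothing) and inputs with a negative cut (outside the natural domain of physical
-- cut lengths; there a taken negative cut grows A's remaining capacity mid-profile, so A's
-- index reset re-admits previously skipped cuts and the packing differs — see cites).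
def Pre_calcular_perfis (cortes : List Int) (tamanho_perfil : Int) : Prop :=
  ∀ c ∈ cortes, 0 ≤ c ∧ c ≤ tamanho_perfil
instance (cortes : List Int) (tamanho_perfil : Int) : Decidable (Pre_calcular_perfis cortes tamanho_perfil) := by unfold Pre_calcular_perfis; infer_instance

def pvWitness_calcular_perfis : List Int × Int := ([300, 2500, 2500, 1200, 6000], 6000)

def Spec_calcular_perfis (cortes : List Int) (tamanho_perfil : Int) (out : Int × List Int × List (List Int)) : Prop := out = calcular_perfis_alt cortes tamanho_perfil
instance (cortes : List Int) (tamanho_perfil : Int) (out : Int × List Int × List (List Int)) : Decidable (Spec_calcular_perfis cortes tamanho_perfil out) := by unfold Spec_calcular_perfis; infer_instance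

-- ===== CLAIM (what is proved, stated in full; the proofs are below) =====
def Claim_equal_calcular_perfis : Prop := ∀ (cortes : List Int) (tamanho_perfil : Int), Dom_calcular_perfis cortes tamanho_perfil → Pre_calcular_perfis cortes tamanho_perfil → Spec_calcular_perfis cortes tamanho_perfil (calcular_perfis cortes tamanho_perfil)

-- ===== LEMMAS AND PROOFS =====

-- folding B's step from an arbitrary accumulator just prepends the accumulator parts
theorem pvPassB_acc (pend : List Int) (perfil prox : List Int) (rem : Int) :
    pend.foldl (fun (st : List Int × List Int × Int) corte =>
      if corte ≤ st.2.2 then (st.1 ++ [corte], st.2.1, st.2.2 - corte)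
      else (st.1, st.2.1 ++ [corte], st.2.2)) (perfil, prox, rem) =
    (perfil ++ (pvPassB pend rem).1, prox ++ (pvPassB pend rem).2.1, (pvPassB pend rem).2.2) := by
  induction pend generalizing perfil prox rem with
  | nil => simp [pvPassB]
  | cons c cs ih =>
    simp only [pvPassB, List.foldl_cons, List.nil_append]
    by_cases h : c ≤ rem
    · rw [if_pos h, if_pos h, ih, ih [c] []]
      simp
    · rw [if_neg h, if_neg h, ih, ih [] [c]]
      simp

theorem pvPassB_cons (c : Int) (cs : List Int) (rem : Int) :
    pvPassB (c :: cs) rem =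
      if c ≤ rem then
        ((pvPassB cs (rem - c)).1.cons c, (pvPassB cs (rem - c)).2.1, (pvPassB cs (rem - c)).2.2)
      else
        ((pvPassB cs rem).1, (pvPassB cs rem).2.1.cons c, (pvPassB cs rem).2.2) := by
  simp only [pvPassB, List.foldl_cons, List.nil_append]
  by_cases h : c ≤ rem
  · rw [if_pos h, if_pos h, pvPassB_acc cs [c] []]
    simp [pvPassB]
  · rw [if_neg h, if_neg h, pvPassB_acc cs [] [c]]
    simp [pvPassB]

-- cuts that never fit all land in the leftover, unchanged
theorem pvPassB_skip (xs ys : List Int) (rem : Int) (hx : ∀ x ∈ xs, rem < x) :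
    pvPassB (xs ++ ys) rem =
      ((pvPassB ys rem).1, xs ++ (pvPassB ys rem).2.1, (pvPassB ys rem).2.2) := by
  induction xs with
  | nil => simp
  | cons x xs ih =>
    have hxr : ¬ x ≤ rem := by have := hx x (by simp); omega
    rw [List.cons_append, pvPassB_cons]
    simp only [hxr, if_false]
    rw [ih (fun y hy => hx y (by simp [hy]))]
    simp

theorem pvPassB_leftover_subset (xs : List Int) (rem : Int) :
    ∀ x ∈ (pvPassB xs rem).2.1, x ∈ xs := by
  induction xs generalizing rem with
  | nil => simp [pvPassB]
  | cons c cs ih =>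
    intro x hx
    rw [pvPassB_cons] at hx
    by_cases h : c ≤ rem
    · simp only [h, if_true] at hx
      exact List.mem_cons_of_mem _ (ih _ x hx)
    · simp only [h, if_false] at hx
      rcases List.mem_cons.mp hx with h1 | h1
      · simp [h1]
      · exact List.mem_cons_of_mem _ (ih _ x h1)

-- MAIN LEMMA: A's inner scan (with pops and index resets) computes B's partition pass,
-- provided all cuts are nonnegative and the first i cuts are already known not to fit.
theorem pvInnerA_eq (rest : List Int) (rem : Int) (perfil : List Int) (i : Nat)
    (hn : ∀ c ∈ rest, 0 ≤ c) (hi : i ≤ rest.length)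
    (hpre : ∀ k (hk : k < i), rem < rest[k]'(by omega)) :
    pvInnerA rest rem perfil i =
      (rest.take i ++ (pvPassB (rest.drop i) rem).2.1,
       (pvPassB (rest.drop i) rem).2.2,
       perfil ++ (pvPassB (rest.drop i) rem).1) := by
  induction rest, rem, perfil, i using pvInnerA.induct with
  | case1 rest rem perfil i h corte hfits ih =>
    -- rest[i] fits
    have hcorte : corte = rest[i] := rfl
    rw [pvInnerA]
    rw [dif_pos h, if_pos (by rw [← hcorte]; exact hfits)]
    have hdrop : rest.drop i = rest[i] :: rest.drop (i + 1) :=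
      (List.getElem_cons_drop h).symm
    have hnn : (0:Int) ≤ rest[i] := hn _ (List.getElem_mem h)
    have herase : rest.eraseIdx i = rest.take i ++ rest.drop (i + 1) :=
      List.eraseIdx_eq_take_drop_succ rest i
    have hskip : ∀ x ∈ rest.take i, rem - rest[i] < x := by
      intro x hx
      obtain ⟨k, hk, hkx⟩ := List.mem_take_iff_getElem.mp hx
      have h1 := hpre k (by omega)
      rw [← hkx]
      omega
    rw [ih (fun c hc => hn c (List.mem_of_mem_eraseIdx hc)) (by omega)
        (by intro k hk; omega)]
    rw [herase, List.drop_zero, List.take_zero, pvPassB_skip _ _ _ (by rw [hcorte]; exact hskip)]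
    rw [hdrop, pvPassB_cons]
    rw [hcorte] at hfits
    simp [hfits, hcorte]
  | case2 rest rem perfil i h corte hfits ih =>
    -- rest[i] does not fit
    have hcorte : corte = rest[i] := rfl
    rw [hcorte] at hfits
    rw [pvInnerA]
    rw [dif_pos h, if_neg hfits]
    rw [ih hn (by omega)
        (by intro k hk
            by_cases hki : k < i
            · exact hpre k hki
            · have : k = i := by omega
              subst this; omega)]
    have hdrop : rest.drop i = rest[i] :: rest.drop (i + 1) :=
      (List.getElem_cons_drop h).symm
    have htake : rest.take (i + 1) = rest.take i ++ [rest[i]] := by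
      rw [List.take_add_one]
      simp [List.getElem?_eq_getElem h]
    rw [hdrop, pvPassB_cons, if_neg hfits, htake, List.append_assoc, List.singleton_append]
  | case3 rest rem perfil i h =>
    rw [pvInnerA]
    have hlen : i = rest.length := by omega
    simp [hlen, pvPassB]

-- the fuelled outer loops agree state by state
theorem pvOuter_eq (fuel : Nat) (rest : List Int) (tam : Int)
    (perfis : List (List Int)) (sobras : List Int)
    (hb : ∀ c ∈ rest, 0 ≤ c ∧ c ≤ tam) :
    pvOuterA fuel rest tam perfis sobras = pvOuterB fuel rest tam perfis sobras := by
  induction fuel generalizing rest perfis sobras with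
  | zero => rfl
  | succ fuel ih =>
    rw [pvOuterA, pvOuterB]
    by_cases h : rest.isEmpty
    · simp [h]
    · -- inside Pre_ a pass always places the head cut, so B's break never fires
      have hne : ¬ (pvPassB rest tam).1.isEmpty := by
        obtain ⟨c, cs, rfl⟩ : ∃ c cs, rest = c :: cs := by
          cases rest with
          | nil => simp at h
          | cons c cs => exact ⟨c, cs, rfl⟩
        rw [pvPassB_cons, if_pos (hb c (by simp)).2]
        simp
      simp only [h, hne, if_neg, Bool.false_eq_true, not_false_iff]
      rw [pvInnerA_eq rest tam [] 0 (fun c hc => (hb c hc).1) (by omega)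
          (by intro k hk; omega)]
      simp only [List.take_zero, List.drop_zero, List.nil_append]
      exact ih _ _ _ (fun c hc => hb c (pvPassB_leftover_subset rest tam c hc))

-- ===== VERDICT (by name: the statement is the Claim_ definition above) =====
theorem calcular_perfis_spec : Claim_equal_calcular_perfis := by
  intro cortes tamanho_perfil _ hpre
  unfold Spec_calcular_perfis
  have hn : ∀ c ∈ PySem.List.sorted cortes (fun x => x) true, 0 ≤ c ∧ c ≤ tamanho_perfil := by
    intro c hc
    exact hpre c ((PySem.List.mem_sorted _ _ _ _).mp hc)
  have hkey := pvOuter_eq (PySem.List.sorted cortes (fun x => x) true).length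
      (PySem.List.sorted cortes (fun x => x) true) tamanho_perfil [] [] hn
  simp only [calcular_perfis, calcular_perfis_alt, hkey]
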